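-- pv_equiv track=rewrite | github.com/hotel-risk-bot/hotel-risk-bot | marketing_update_generator.py | _get_wc_metrics
-- ===== SOURCE A (Python) =====
-- def _get_wc_metrics(carriers_data, is_internal=True):
--     metrics = ["Premium", "Total Payroll"]
--     all_values = {}
--     for c in carriers_data:
--         for k, v in c["values"].items():
--             if k not in all_values:
--                 all_values[k] = []
--             all_values[k].append(v)
--     for m in ["Exp Mod", "Safety Credit", "Drug Free Credit"]:
--         if m in all_values and any(v not in ("\u2014", "No") for v in all_values[m]):
--             metrics.append(m)
--     # Broker on all versions
--     if "Broker" in all_values and any(v != "\u2014" for v in all_values["Broker"]):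
--         metrics.append("Broker")
--     if is_internal:
--         for m in ["Commission", "Revenue"]:
--             if m in all_values and any(v != "\u2014" for v in all_values[m]):
--                 metrics.append(m)
--     return metrics
-- ===== SOURCE B (Python) =====
-- def _get_wc_metrics(carriers_data, is_internal=True):
--     def hit(m, sentinels):
--         return any(m in c["values"] and c["values"][m] not in sentinels
--                    for c in carriers_data)
--     return (["Premium", "Total Payroll"]
--             + [m for m in ("Exp Mod", "Safety Credit", "Drug Free Credit")
--                if hit(m, ("\u2014", "No"))]
--             + (["Broker"] if hit("Broker", ("\u2014",)) else [])
--             + ([m for m in ("Commission", "Revenue") if hit(m, ("\u2014",))]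
--                if is_internal else []))
-- ===== Notes on version B (the rewrite author's own statement) =====
-- stated objective: simpler
-- what changed: Drops A's build-a-grouping-index-then-scan structure: B never materialises the all_values dict, instead testing each candidate metric with one direct any() scan over the carriers, and assembles the result by list concatenation instead of conditional appends.
import Mathlib
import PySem

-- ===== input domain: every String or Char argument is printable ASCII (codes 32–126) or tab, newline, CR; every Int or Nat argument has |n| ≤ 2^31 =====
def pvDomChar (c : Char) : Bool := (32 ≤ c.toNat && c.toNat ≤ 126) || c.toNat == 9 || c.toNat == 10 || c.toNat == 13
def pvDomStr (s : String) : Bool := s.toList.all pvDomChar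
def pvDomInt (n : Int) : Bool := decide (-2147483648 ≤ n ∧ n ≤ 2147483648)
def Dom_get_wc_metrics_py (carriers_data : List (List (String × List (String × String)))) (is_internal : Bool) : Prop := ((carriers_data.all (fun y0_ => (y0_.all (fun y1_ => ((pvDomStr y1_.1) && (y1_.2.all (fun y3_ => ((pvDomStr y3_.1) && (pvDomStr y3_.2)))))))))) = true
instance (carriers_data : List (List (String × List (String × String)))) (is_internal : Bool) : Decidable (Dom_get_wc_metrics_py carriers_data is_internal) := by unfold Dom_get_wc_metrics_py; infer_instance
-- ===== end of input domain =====

-- B drops A's all_values grouping dict and instead tests each candidate metric by one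
-- direct any() scan over the carriers, assembling the result by list concatenation
-- (objective: simpler; same observable return value on Pre_).

-- c["values"] as a Python dict lookup (the carrier and its values are dicts built from
-- the association lists; duplicate keys overwrite as in Python): shared dict-access model.
def pvVDict (c : List (String × List (String × String))) : PySem.Dict String String :=
  PySem.Dict.ofList ((PySem.Dict.ofList c).getD "values" [])

-- ===== PORT A =====
def get_wc_metrics_py (carriers_data : List (List (String × List (String × String)))) (is_internal : Bool) : List String :=
  let all_values : PySem.Dict String (List String) :=
    carriers_data.foldl (fun av c =>
      ((pvVDict c).items).foldl (fun av kv => av.modify kv.1 [] (· ++ [kv.2])) av)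
      PySem.Dict.empty
  let metrics : List String := ["Premium", "Total Payroll"]
  let metrics := ["Exp Mod", "Safety Credit", "Drug Free Credit"].foldl (fun ms m =>
      if all_values.contains m && (all_values.getD m []).any (fun v => !(v == "—" || v == "No"))
      then ms ++ [m] else ms) metrics
  let metrics :=
    if all_values.contains "Broker" && (all_values.getD "Broker" []).any (fun v => !(v == "—"))
    then metrics ++ ["Broker"] else metrics
  let metrics :=
    if is_internal then
      ["Commission", "Revenue"].foldl (fun ms m =>
        if all_values.contains m && (all_values.getD m []).any (fun v => !(v == "—"))
        then ms ++ [m] else ms) metrics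
    else metrics
  metrics

-- ===== PORT B =====
def pvHit (carriers_data : List (List (String × List (String × String)))) (m : String) (sentinels : List String) : Bool :=
  carriers_data.any (fun c =>
    match (pvVDict c).get? m with
    | some v => !(sentinels.contains v)
    | none => false)

def get_wc_metrics_py_alt (carriers_data : List (List (String × List (String × String)))) (is_internal : Bool) : List String :=
  ["Premium", "Total Payroll"]
  ++ (["Exp Mod", "Safety Credit", "Drug Free Credit"].filter (fun m => pvHit carriers_data m ["—", "No"]))
  ++ (if pvHit carriers_data "Broker" ["—"] then ["Broker"] else [])
  ++ (if is_internal then ["Commission", "Revenue"].filter (fun m => pvHit carriers_data m ["—"]) else [])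

-- ===== PRECONDITION & SPEC =====
-- Pre_ excludes exactly the inputs where some carrier dict lacks the key "values":
-- there the Python A raises KeyError (it touches c["values"] for every carrier).
def Pre_get_wc_metrics_py (carriers_data : List (List (String × List (String × String)))) (is_internal : Bool) : Prop :=
  ∀ c ∈ carriers_data, (PySem.Dict.ofList c).contains "values" = true
instance (carriers_data : List (List (String × List (String × String)))) (is_internal : Bool) : Decidable (Pre_get_wc_metrics_py carriers_data is_internal) := by unfold Pre_get_wc_metrics_py; infer_instance

def pvWitness_get_wc_metrics_py : (List (List (String × List (String × String)))) × Bool :=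
  ([[("values", [("Exp Mod", "1.2"), ("Broker", "ABC")])], [("values", [("Commission", "5%")])]], true)

def Spec_get_wc_metrics_py (carriers_data : List (List (String × List (String × String)))) (is_internal : Bool) (out : List String) : Prop := out = get_wc_metrics_py_alt carriers_data is_internal
instance (carriers_data : List (List (String × List (String × String)))) (is_internal : Bool) (out : List String) : Decidable (Spec_get_wc_metrics_py carriers_data is_internal out) := by unfold Spec_get_wc_metrics_py; infer_instance

-- ===== CLAIM (what is proved, stated in full; the proofs are below) =====
def Claim_equal_get_wc_metrics_py : Prop := ∀ (carriers_data : List (List (String × List (String × String)))) (is_internal : Bool), Dom_get_wc_metrics_py carriers_data is_internal → Pre_get_wc_metrics_py carriers_data is_internal → Spec_get_wc_metrics_py carriers_data is_internal (get_wc_metrics_py carriers_data is_internal)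

-- ===== LEMMAS AND PROOFS =====

-- the values grouped under key m across all carriers (A's all_values[m])
def pvGroup (carriers_data : List (List (String × List (String × String)))) (m : String) : List String :=
  carriers_data.flatMap (fun c => ((pvVDict c).items.filter (fun q => q.1 == m)).map (·.2))

theorem pv_filter_items (d : PySem.Dict String String) (hn : d.keys.Nodup) (m : String) :
    (d.items.filter (fun q => q.1 == m)).map (·.2) = (d.get? m).toList := by
  obtain ⟨L⟩ := d
  induction L with
  | nil => simp [PySem.Dict.get?]
  | cons kv rest ih =>
    simp only [PySem.Dict.keys_mk, List.map_cons, List.nodup_cons] at hn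
    rw [PySem.Dict.get?_mk_cons]
    by_cases h : kv.1 = m
    · subst h
      simp only [List.filter_cons, beq_self_eq_true, if_pos, List.map_cons, Option.toList_some]
      have hf : rest.filter (fun q => q.1 == kv.1) = [] := by
        apply List.filter_eq_nil_iff.mpr
        intro q hq
        simp only [beq_iff_eq]
        intro hc
        exact hn.1 (hc ▸ List.mem_map_of_mem hq)
      simp [hf]
    · have hb : (kv.1 == m) = false := by simpa using h
      simp only [List.filter_cons, hb, if_neg, Bool.false_eq_true, not_false_iff]
      have := ih (by simpa [PySem.Dict.keys_mk] using hn.2)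
      simpa [PySem.Dict.keys_mk] using this

theorem pv_getD_build (m : String) :
    ∀ (cd : List (List (String × List (String × String)))) (av : PySem.Dict String (List String)),
    (cd.foldl (fun av c =>
      ((pvVDict c).items).foldl (fun av kv => av.modify kv.1 [] (· ++ [kv.2])) av) av).getD m []
    = av.getD m [] ++ pvGroup cd m := by
  intro cd
  induction cd with
  | nil => simp [pvGroup]
  | cons c rest ih =>
    intro av
    simp only [List.foldl_cons, pvGroup, List.flatMap_cons]
    rw [ih, PySem.Dict.getD_foldl_modify_append]
    simp [pvGroup, List.append_assoc]

theorem pv_cond_eq (cd : List (List (String × List (String × String)))) (m : String) (p : String → Bool) :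
    ((cd.foldl (fun av c =>
      ((pvVDict c).items).foldl (fun av kv => av.modify kv.1 [] (· ++ [kv.2])) av)
      PySem.Dict.empty).contains m
     && ((cd.foldl (fun av c =>
      ((pvVDict c).items).foldl (fun av kv => av.modify kv.1 [] (· ++ [kv.2])) av)
      PySem.Dict.empty).getD m []).any p)
    = cd.any (fun c => match (pvVDict c).get? m with
              | some v => p v
              | none => false) := by
  have hG : pvGroup cd m = cd.flatMap (fun c => ((pvVDict c).get? m).toList) := by
    unfold pvGroup
    exact List.flatMap_congr (fun c _ => pv_filter_items _ (PySem.Dict.nodup_keys_ofList _) m)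
  have hAny : (pvGroup cd m).any p
      = cd.any (fun c => match (pvVDict c).get? m with
                | some v => p v
                | none => false) := by
    rw [hG]
    rw [List.any_flatMap]
    refine List.any_congr rfl (fun c => ?_)
    cases (pvVDict c).get? m <;> simp
  by_cases h : (cd.foldl (fun av c =>
      ((pvVDict c).items).foldl (fun av kv => av.modify kv.1 [] (· ++ [kv.2])) av)
      PySem.Dict.empty).contains m = true
  · rw [h, Bool.true_and, pv_getD_build, PySem.Dict.getD_empty, List.nil_append, hAny]
  · have hf : _ = false := Bool.eq_false_iff.mpr h
    rw [hf, Bool.false_and]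
    have hg : pvGroup cd m = [] := by
      have := PySem.Dict.getD_of_not_contains _ ([] : List String) hf
      rw [pv_getD_build, PySem.Dict.getD_empty, List.nil_append] at this
      exact this
    rw [← hAny, hg]
    simp

-- ===== VERDICT (by name: the statement is the Claim_ definition above) =====
theorem get_wc_metrics_py_spec : Claim_equal_get_wc_metrics_py := by
  intro cd ii _ _
  unfold Spec_get_wc_metrics_py get_wc_metrics_py get_wc_metrics_py_alt
  simp only [List.foldl_cons, List.foldl_nil, List.filter_cons, List.filter_nil]
  rw [pv_cond_eq cd "Exp Mod", pv_cond_eq cd "Safety Credit", pv_cond_eq cd "Drug Free Credit",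
      pv_cond_eq cd "Broker", pv_cond_eq cd "Commission", pv_cond_eq cd "Revenue"]
  have hp2 : ∀ m, (cd.any (fun c => match (pvVDict c).get? m with
        | some v => !(v == "—" || v == "No")
        | none => false)) = pvHit cd m ["—", "No"] := by
    intro m
    unfold pvHit
    refine List.any_congr rfl (fun c => ?_)
    cases (pvVDict c).get? m <;> simp [beq_eq_decide]
  have hp1 : ∀ m, (cd.any (fun c => match (pvVDict c).get? m with
        | some v => !(v == "—")
        | none => false)) = pvHit cd m ["—"] := by
    intro m
    unfold pvHit
    refine List.any_congr rfl (fun c => ?_)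
    cases (pvVDict c).get? m <;> simp [beq_eq_decide]
  rw [hp2, hp2, hp2, hp1, hp1, hp1]
  cases h1 : pvHit cd "Exp Mod" ["—", "No"] <;>
  cases h2 : pvHit cd "Safety Credit" ["—", "No"] <;>
  cases h3 : pvHit cd "Drug Free Credit" ["—", "No"] <;>
  cases h4 : pvHit cd "Broker" ["—"] <;>
  cases h5 : pvHit cd "Commission" ["—"] <;>
  cases h6 : pvHit cd "Revenue" ["—"] <;>
  cases ii <;> rfl
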